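-- pv_equiv track=rewrite | github.com/DJ4ME/BlueFairy | bluefairy/grammar/utils.py | parentheses_signature
-- ===== SOURCE A (Python) =====
-- def parentheses_signature(tokens: list[str]) -> list[int]:
--     sig = []
--     depth = 0
--     for t in tokens:
--         if t == "(":
--             depth += 1
--         elif t == ")":
--             depth -= 1
--         sig.append(depth)
--     return sig
-- ===== SOURCE B (Python) =====
-- def parentheses_signature(tokens: list[str]) -> list[int]:
--     d = tokens.count("(") - tokens.count(")")
--     out = []
--     for t in reversed(tokens):
--         out.append(d)
--         if t == "(":
--             d -= 1
--         elif t == ")":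
--             d += 1
--     out.reverse()
--     return out
-- ===== Notes on version B (the rewrite author's own statement) =====
-- stated objective: alternative
-- what changed: B first counts the total of opens minus closes with list.count, then builds the signature back-to-front by a reversed traversal that undoes each token's delta, reversing the buffer at the end, instead of A's forward accumulation with a running depth.
import Mathlib
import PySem

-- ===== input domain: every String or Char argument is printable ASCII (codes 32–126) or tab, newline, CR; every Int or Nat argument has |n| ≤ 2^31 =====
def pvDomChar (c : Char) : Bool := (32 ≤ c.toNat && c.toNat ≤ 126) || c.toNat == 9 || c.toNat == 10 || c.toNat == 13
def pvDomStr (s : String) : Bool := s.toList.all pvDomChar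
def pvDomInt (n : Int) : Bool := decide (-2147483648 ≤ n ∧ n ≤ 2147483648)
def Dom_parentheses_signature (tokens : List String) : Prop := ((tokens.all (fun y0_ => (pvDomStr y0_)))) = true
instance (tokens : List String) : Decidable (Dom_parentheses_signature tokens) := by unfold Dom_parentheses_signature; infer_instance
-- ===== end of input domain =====

-- B computes the total open-minus-close count first, then fills the signature back-to-front by a reversed traversal undoing each delta; objective: alternative (same cost, different construction order).


-- ===== PORT A =====
-- transliteration of A: forward fold carrying (sig, depth), appending depth each step
def parentheses_signature (tokens : List String) : List Int :=
  (tokens.foldl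
    (fun (st : List Int × Int) t =>
      let depth := if t = "(" then st.2 + 1 else if t = ")" then st.2 - 1 else st.2
      (st.1 ++ [depth], depth))
    ([], 0)).1

-- ===== PORT B =====
-- transliteration of B: count totals, then loop over reversed(tokens) appending d and undoing the delta, finally reverse the buffer
def parentheses_signature_alt (tokens : List String) : List Int :=
  let d0 : Int := (PySem.List.count tokens "(" : Int) - (PySem.List.count tokens ")" : Int)
  (tokens.reverse.foldl
    (fun (st : List Int × Int) t =>
      let out := st.1 ++ [st.2]
      let d := if t = "(" then st.2 - 1 else if t = ")" then st.2 + 1 else st.2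
      (out, d))
    ([], d0)).1.reverse

-- ===== PRECONDITION & SPEC =====
def Spec_parentheses_signature (tokens : List String) (out : List Int) : Prop := out = parentheses_signature_alt tokens
instance (tokens : List String) (out : List Int) : Decidable (Spec_parentheses_signature tokens out) := by unfold Spec_parentheses_signature; infer_instance

-- ===== CLAIM (what is proved, stated in full; the proofs are below) =====
def Claim_equal_parentheses_signature : Prop := ∀ (tokens : List String), Dom_parentheses_signature tokens → Spec_parentheses_signature tokens (parentheses_signature tokens)

-- ===== LEMMAS AND PROOFS =====
-- delta of one token, the total delta of a list, and the forward depth sequence (the common spec)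
def pvDelta (t : String) : Int := if t = "(" then 1 else if t = ")" then -1 else 0

def pvTotal : List String → Int
  | [] => 0
  | t :: ts => pvDelta t + pvTotal ts

def pvDepths (d : Int) : List String → List Int
  | [] => []
  | t :: ts => (d + pvDelta t) :: pvDepths (d + pvDelta t) ts

-- the reversed-order depth sequence B builds before its final reverse
def pvRevDepths (d : Int) : List String → List Int
  | [] => []
  | t :: ts => d :: pvRevDepths (d - pvDelta t) ts

theorem pvRevDepths_append (xs ys : List String) : ∀ d : Int,
    pvRevDepths d (xs ++ ys) = pvRevDepths d xs ++ pvRevDepths (d - pvTotal xs.reverse) ys := by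
  induction xs with
  | nil => intro d; simp [pvRevDepths, pvTotal]
  | cons x xs ih =>
      intro d
      simp only [List.cons_append, pvRevDepths, ih, List.reverse_cons]
      have : pvTotal (xs.reverse ++ [x]) = pvTotal xs.reverse + pvDelta x := by
        clear ih; induction xs.reverse with
        | nil => simp [pvTotal]
        | cons y ys ihy => simp [pvTotal, ihy]; omega
      rw [this]
      have h2 : d - pvDelta x - pvTotal xs.reverse = d - (pvTotal xs.reverse + pvDelta x) := by omega
      rw [h2]

-- A's fold equals sig ++ forward depths
theorem pv_foldA (ts : List String) : ∀ (sig : List Int) (depth : Int),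
    (ts.foldl
      (fun (st : List Int × Int) t =>
        let d := if t = "(" then st.2 + 1 else if t = ")" then st.2 - 1 else st.2
        (st.1 ++ [d], d))
      (sig, depth)).1 = sig ++ pvDepths depth ts := by
  induction ts with
  | nil => intro sig depth; simp [pvDepths]
  | cons t ts ih =>
      intro sig depth
      simp only [List.foldl_cons, pvDepths]
      rw [ih]
      have : (if t = "(" then depth + 1 else if t = ")" then depth - 1 else depth)
            = depth + pvDelta t := by unfold pvDelta; split_ifs <;> omega
      simp [this]

-- B's fold equals out ++ reversed depths
theorem pv_foldB (rs : List String) : ∀ (out : List Int) (d : Int),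
    (rs.foldl
      (fun (st : List Int × Int) t =>
        let o := st.1 ++ [st.2]
        let d' := if t = "(" then st.2 - 1 else if t = ")" then st.2 + 1 else st.2
        (o, d'))
      (out, d)).1 = out ++ pvRevDepths d rs := by
  induction rs with
  | nil => intro out d; simp [pvRevDepths]
  | cons t ts ih =>
      intro out d
      simp only [List.foldl_cons, pvRevDepths]
      rw [ih]
      have : (if t = "(" then d - 1 else if t = ")" then d + 1 else d) = d - pvDelta t := by
        unfold pvDelta; split_ifs <;> omega
      simp [this]

-- reversing the reversed depth sequence yields the forward one
theorem pvRevDepths_reverse (ts : List String) : ∀ d : Int,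
    (pvRevDepths d ts.reverse).reverse = pvDepths (d - pvTotal ts) ts := by
  induction ts with
  | nil => intro d; simp [pvRevDepths, pvDepths]
  | cons t ts ih =>
      intro d
      simp only [List.reverse_cons, pvRevDepths_append, pvDepths, pvTotal,
        List.reverse_reverse, pvRevDepths, List.reverse_append, List.reverse_cons,
        List.reverse_nil, List.nil_append]
      rw [ih]
      have h : d - (pvDelta t + pvTotal ts) + pvDelta t = d - pvTotal ts := by omega
      rw [h]
      simp

-- the count-based start value is the total delta
theorem pv_count_total (ts : List String) :
    ((PySem.List.count ts "(" : Int) - (PySem.List.count ts ")" : Int)) = pvTotal ts := by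
  induction ts with
  | nil => simp [PySem.List.count, pvTotal]
  | cons t ts ih =>
      simp only [pvTotal, PySem.List.count, List.count_cons] at *
      unfold pvDelta
      by_cases h1 : t = "(" <;> by_cases h2 : t = ")" <;>
        simp_all <;> omega

-- ===== VERDICT (by name: the statement is the Claim_ definition above) =====
theorem parentheses_signature_spec : Claim_equal_parentheses_signature := by
  intro tokens _
  unfold Spec_parentheses_signature parentheses_signature parentheses_signature_alt
  rw [pv_foldA]
  simp only [pv_foldB, pv_count_total]
  simp [pvRevDepths_reverse]
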